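-- pv_equiv track=rewrite | github.com/CvanderStoep/adventofcode2015 | day8.py | encoded_length
-- ===== SOURCE A (Python) =====
-- def encoded_length(line):
--     encoded_string = '"'  # Start with an extra double quote
--     for char in line:
--         if char == '\\' or char == '"':
--             encoded_string += '\\'  # Add an escape character for backslash or double quote
--         encoded_string += char
--     encoded_string += '"'  # End with an extra double quote
--     return len(encoded_string)
-- ===== SOURCE B (Python) =====
-- def encoded_length(line):
--     # count-based: length of encoded string without materializing it
--     return len(line) + 2 + sum(1 for c in line if c == '\\' or c == '"')
-- ===== Notes on version B (the rewrite author's own statement) =====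
-- stated objective: simpler
-- what changed: B computes the encoded length arithmetically (len + 2 + escape count) instead of building the encoded string and measuring it.
import Mathlib
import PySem

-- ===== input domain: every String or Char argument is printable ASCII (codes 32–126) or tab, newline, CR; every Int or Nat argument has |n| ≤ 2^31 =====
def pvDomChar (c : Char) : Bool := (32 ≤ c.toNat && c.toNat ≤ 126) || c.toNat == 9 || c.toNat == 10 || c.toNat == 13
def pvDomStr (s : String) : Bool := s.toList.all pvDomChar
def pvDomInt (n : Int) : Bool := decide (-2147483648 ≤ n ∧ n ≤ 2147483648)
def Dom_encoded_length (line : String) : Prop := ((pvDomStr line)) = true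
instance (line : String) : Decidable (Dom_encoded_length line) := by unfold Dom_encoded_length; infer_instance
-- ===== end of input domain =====

-- B changes: compute the encoded length arithmetically (len + 2 + escape count) instead of building the encoded string; objective: simpler.

-- ===== PORT A =====
-- A builds the encoded string character by character, then returns its length.
def encoded_length (line : String) : Int :=
  let encoded_string : List Char := ['"']
  let encoded_string :=
    line.toList.foldl (fun acc char =>
      let acc := if char = '\\' ∨ char = '"' then acc ++ ['\\'] else acc
      acc ++ [char]) encoded_string
  let encoded_string := encoded_string ++ ['"']
  (encoded_string.length : Int)

-- ===== PORT B =====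
-- B: len(line) + 2 + sum(1 for c in line if c == '\\' or c == '"')
def encoded_length_alt (line : String) : Int :=
  (line.toList.length : Int) + 2 +
    (line.toList.foldl (fun s c => if c = '\\' ∨ c = '"' then s + 1 else s) (0 : Int))

-- ===== PRECONDITION & SPEC =====
def Spec_encoded_length (line : String) (out : Int) : Prop := out = encoded_length_alt line
instance (line : String) (out : Int) : Decidable (Spec_encoded_length line out) := by unfold Spec_encoded_length; infer_instance

-- ===== CLAIM (what is proved, stated in full; the proofs are below) =====
def Claim_equal_encoded_length : Prop := ∀ (line : String), Dom_encoded_length line → Spec_encoded_length line (encoded_length line)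

-- ===== LEMMAS AND PROOFS =====

theorem count_shift (t : List Char) (k : Int) :
    t.foldl (fun s c => if c = '\\' ∨ c = '"' then s + 1 else s) k
    = k + t.foldl (fun s c => if c = '\\' ∨ c = '"' then s + 1 else s) 0 := by
  induction t generalizing k with
  | nil => simp
  | cons c' t' ih' =>
    simp only [List.foldl_cons]
    rw [ih', ih' (if c' = '\\' ∨ c' = '"' then (0:Int) + 1 else 0)]
    split_ifs <;> ring

-- invariant: A's fold length = initial length + list length + escape count
theorem encoded_length_fold_len (l : List Char) (acc : List Char) :
    (((l.foldl (fun acc char =>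
        (if char = '\\' ∨ char = '"' then acc ++ ['\\'] else acc) ++ [char]) acc).length : Int))
    = (acc.length : Int) + (l.length : Int) +
      (l.foldl (fun s c => if c = '\\' ∨ c = '"' then s + 1 else s) (0 : Int)) := by
  induction l generalizing acc with
  | nil => simp
  | cons c t ih =>
    simp only [List.foldl_cons]
    by_cases h : c = '\\' ∨ c = '"'
    · rw [if_pos h, if_pos h, ih, count_shift t ((0:Int)+1)]
      simp only [List.length_append, List.length_cons, List.length_nil]
      push_cast; ring
    · rw [if_neg h, if_neg h, ih]
      simp only [List.length_append, List.length_cons, List.length_nil]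
      push_cast; ring

-- ===== VERDICT (by name: the statement is the Claim_ definition above) =====
theorem encoded_length_spec : Claim_equal_encoded_length := by
  intro line _
  unfold Spec_encoded_length encoded_length encoded_length_alt
  simp only []
  push_cast [List.length_append]
  rw [encoded_length_fold_len]
  simp only [List.length_cons, List.length_nil]
  push_cast; ring
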